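-- pv_equiv track=rewrite | github.com/IAmSoThirsty/Project-AI | src/thirsty_lang/src/thirsty_interpreter.py | _find_op_idx
-- ===== SOURCE A (Python) =====
-- def _find_op_idx(expr, op, reverse=False):
--     d = 0
--     rng = range(len(expr) - 1, -1, -1) if reverse else range(len(expr))
--     for i in rng:
--         if expr[i] == ")":
--             d += 1
--         elif expr[i] == "(":
--             d -= 1
--         elif d == 0 and expr[i:i + len(op)] == op:
--             return i
--     return -1
-- ===== SOURCE B (Python) =====
-- def _find_op_idx(expr, op, reverse=False):
--     idxs = range(len(expr) - 1, -1, -1) if reverse else range(len(expr))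
--     # pass 1: depth-before-examining table, accumulated in traversal order
--     depths = []
--     d = 0
--     for i in idxs:
--         depths.append(d)
--         d += 1 if expr[i] == ")" else -1 if expr[i] == "(" else 0
--     # pass 2: first (index, depth) pair at depth 0 whose forward slice equals op
--     return next((i for i, di in zip(idxs, depths)
--                  if expr[i] != ")" and expr[i] != "(" and di == 0
--                  and expr[i:i + len(op)] == op), -1)
-- ===== Notes on version B (the rewrite author's own statement) =====
-- stated objective: alternative
-- what changed: A's single fused scan (depth counter updated and match tested in one loop with early return) is replaced by a staged pipeline: a fold first tabulates the depth before each position in traversal order, then a generic first-match search (zip + find) over the (index, depth) pairs picks the first depth-0 index whose forward slice equals op.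
import Mathlib
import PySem

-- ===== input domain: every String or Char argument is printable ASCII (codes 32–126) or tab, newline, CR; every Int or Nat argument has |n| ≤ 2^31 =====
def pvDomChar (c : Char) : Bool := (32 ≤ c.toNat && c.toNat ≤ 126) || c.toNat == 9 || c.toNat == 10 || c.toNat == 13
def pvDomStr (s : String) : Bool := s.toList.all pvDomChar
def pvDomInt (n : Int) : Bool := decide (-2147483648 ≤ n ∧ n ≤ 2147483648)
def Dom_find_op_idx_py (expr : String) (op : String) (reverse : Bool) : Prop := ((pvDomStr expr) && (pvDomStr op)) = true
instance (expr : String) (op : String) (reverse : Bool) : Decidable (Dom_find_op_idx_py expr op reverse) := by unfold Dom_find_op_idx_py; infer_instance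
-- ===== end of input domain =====

-- B replaces A's fused scan (depth counter + match test + early return in one loop) by a
-- staged pipeline: a fold tabulating the depth table, then zip-and-find for the first
-- depth-0 match (objective: alternative decomposition, same cost).

-- ===== PORT A =====
-- the fused loop of A: one pass carrying the running depth d, early return on a match
def pvALoop (s o : List Char) : List Int → Int → Int
  | [], _ => -1
  | i :: rest, d =>
    if PySem.List.pyGet? s i = some ')' then pvALoop s o rest (d + 1)
    else if PySem.List.pyGet? s i = some '(' then pvALoop s o rest (d - 1)
    else if d = 0 ∧ PySem.List.slice s (some i) (some (i + (o.length : Int))) = o then i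
    else pvALoop s o rest d

def find_op_idx_py (expr : String) (op : String) (reverse : Bool) : Int :=
  let s := expr.toList
  let o := op.toList
  let rng := if reverse then PySem.List.pyRange ((s.length : Int) - 1) (-1) (-1)
             else PySem.List.pyRange 0 (s.length : Int) 1
  pvALoop s o rng 0

-- ===== PORT B =====
def find_op_idx_py_alt (expr : String) (op : String) (reverse : Bool) : Int :=
  let s := expr.toList
  let o := op.toList
  let idxs := if reverse then PySem.List.pyRange ((s.length : Int) - 1) (-1) (-1)
              else PySem.List.pyRange 0 (s.length : Int) 1
  -- pass 1: depth table via a fold accumulating (table so far, running depth)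
  let depths := (idxs.foldl (fun (st : List Int × Int) i =>
      (st.1 ++ [st.2],
       st.2 + (if PySem.List.pyGet? s i = some ')' then 1
               else if PySem.List.pyGet? s i = some '(' then -1 else 0))) ([], 0)).1
  -- pass 2: first (index, depth) pair at depth 0 whose forward slice equals op
  match (idxs.zip depths).find? (fun p =>
      PySem.List.pyGet? s p.1 != some ')' && PySem.List.pyGet? s p.1 != some '(' &&
      p.2 == 0 && PySem.List.slice s (some p.1) (some (p.1 + (o.length : Int))) == o) with
  | some p => p.1
  | none => -1

-- ===== PRECONDITION & SPEC =====
def Spec_find_op_idx_py (expr : String) (op : String) (reverse : Bool) (out : Int) : Prop := out = find_op_idx_py_alt expr op reverse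
instance (expr : String) (op : String) (reverse : Bool) (out : Int) : Decidable (Spec_find_op_idx_py expr op reverse out) := by unfold Spec_find_op_idx_py; infer_instance

-- ===== CLAIM (what is proved, stated in full; the proofs are below) =====
def Claim_equal_find_op_idx_py : Prop := ∀ (expr : String) (op : String) (reverse : Bool), Dom_find_op_idx_py expr op reverse → Spec_find_op_idx_py expr op reverse (find_op_idx_py expr op reverse)

-- ===== LEMMAS AND PROOFS =====
-- proof-side recursive characterisation of the depth table built by B's fold
def pvDep (s : List Char) : List Int → Int → List Int
  | [], _ => []
  | i :: rest, d =>
    d :: pvDep s rest (d + (if PySem.List.pyGet? s i = some ')' then 1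
                            else if PySem.List.pyGet? s i = some '(' then -1 else 0))

theorem pvFold_eq_dep (s : List Char) :
    ∀ (idxs : List Int) (acc : List Int) (d : Int),
      (idxs.foldl (fun (st : List Int × Int) i =>
        (st.1 ++ [st.2],
         st.2 + (if PySem.List.pyGet? s i = some ')' then 1
                 else if PySem.List.pyGet? s i = some '(' then -1 else 0))) (acc, d)).1
      = acc ++ pvDep s idxs d := by
  intro idxs
  induction idxs with
  | nil => intro acc d; simp [pvDep]
  | cons i rest ih =>
    intro acc d
    simp only [List.foldl_cons, pvDep, ih]
    simp

theorem pvALoop_eq_find (s o : List Char) :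
    ∀ (idxs : List Int) (d : Int),
      pvALoop s o idxs d =
      (match (idxs.zip (pvDep s idxs d)).find? (fun p =>
          PySem.List.pyGet? s p.1 != some ')' && PySem.List.pyGet? s p.1 != some '(' &&
          p.2 == 0 && PySem.List.slice s (some p.1) (some (p.1 + (o.length : Int))) == o) with
        | some p => p.1
        | none => -1) := by
  intro idxs
  induction idxs with
  | nil => intro d; rfl
  | cons i rest ih =>
    intro d
    simp only [pvALoop, pvDep, List.zip_cons_cons, List.find?_cons]
    by_cases h1 : PySem.List.pyGet? s i = some ')'
    · simp [h1, ih]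
    · by_cases h2 : PySem.List.pyGet? s i = some '('
      · simp [h2, ih, sub_eq_add_neg]
      · by_cases h3 : d = 0 ∧ PySem.List.slice s (some i) (some (i + (o.length : Int))) = o
        · have hb1 : (PySem.List.pyGet? s i != some ')') = true := by simp [h1]
          have hb2 : (PySem.List.pyGet? s i != some '(') = true := by simp [h2]
          simp [h1, h2, h3.1, h3.2, hb1, hb2]
        · have hp : (PySem.List.pyGet? s i != some ')' && PySem.List.pyGet? s i != some '(' &&
              d == 0 && (PySem.List.slice s (some i) (some (i + (o.length : Int))) == o)) = false := by
            rcases Decidable.not_and_iff_or_not.mp h3 with h | h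
            · simp [h]
            · simp [h]
          simp only [if_neg h1, if_neg h2, if_neg h3, hp]
          simpa using ih d

-- ===== VERDICT (by name: the statement is the Claim_ definition above) =====
theorem find_op_idx_py_spec : Claim_equal_find_op_idx_py := by
  intro expr op reverse _
  unfold Spec_find_op_idx_py find_op_idx_py find_op_idx_py_alt
  simp only [pvFold_eq_dep, List.nil_append]
  exact pvALoop_eq_find _ _ _ _
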